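-- pv_equiv track=rewrite | github.com/kimheekimhee/01-PJT-04 | 1회차/윤혜진/4_어디에단어가들어갈수있을까.py | cnt_K
-- ===== SOURCE A (Python) =====
-- def cnt_K(matrix, K):
--     cnt_K = 0
--     for row in matrix:
--         cnt = 0
--         for block in row:
--             if block == '0':
--                 if cnt == K:
--                     cnt_K += 1
--                 cnt = 0   # 초기화
--             else:
--                 cnt += 1
--
--         if cnt == K:
--             cnt_K += 1
--
--     return cnt_K
-- ===== SOURCE B (Python) =====
-- def cnt_K(matrix, K):
--     total = 0
--     for row in matrix:
--         bounds = [-1] + [i for i, cell in enumerate(row) if cell == '0'] + [len(row)]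
--         total += sum(1 for x, y in zip(bounds, bounds[1:]) if y - x - 1 == K)
--     return total
-- ===== Notes on version B (the rewrite author's own statement) =====
-- stated objective: alternative
-- what changed: Replaces A's running counter with mutable reset/trailing-check logic by an index-based decomposition: collect the positions of '0' cells as boundaries (with -1 and len(row) as sentinels) and count adjacent boundary gaps of size exactly K.
import Mathlib
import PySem

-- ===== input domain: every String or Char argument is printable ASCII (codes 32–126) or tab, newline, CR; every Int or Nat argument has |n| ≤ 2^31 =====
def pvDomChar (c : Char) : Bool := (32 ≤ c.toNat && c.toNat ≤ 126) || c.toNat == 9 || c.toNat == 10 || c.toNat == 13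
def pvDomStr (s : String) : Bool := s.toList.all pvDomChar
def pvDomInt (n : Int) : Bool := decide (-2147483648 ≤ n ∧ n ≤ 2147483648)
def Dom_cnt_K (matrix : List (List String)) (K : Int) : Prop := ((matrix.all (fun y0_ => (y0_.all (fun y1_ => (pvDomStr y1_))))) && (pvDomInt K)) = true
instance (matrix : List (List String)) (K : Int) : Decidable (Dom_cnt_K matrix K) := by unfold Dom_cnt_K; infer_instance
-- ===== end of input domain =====

-- B replaces A's running counter (with reset on '0' and a trailing check) by a boundary
-- decomposition: the '0' positions plus sentinels -1 and len(row), counting adjacent gaps of size K.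

-- ===== PORT A =====
def cnt_K (matrix : List (List String)) (K : Int) : Int :=
  matrix.foldl (fun cntK row =>
    let r := row.foldl (fun (st : Int × Int) block =>
      if block == "0" then
        ((if st.2 == K then st.1 + 1 else st.1), 0)
      else (st.1, st.2 + 1)) (cntK, 0)
    if r.2 == K then r.1 + 1 else r.1) 0

-- ===== PORT B =====
def cnt_K_alt (matrix : List (List String)) (K : Int) : Int :=
  matrix.foldl (fun total row =>
    let zs : List Int := row.zipIdx.filterMap (fun p => if p.1 == "0" then some (p.2 : Int) else none)
    let bounds : List Int := (-1 : Int) :: zs ++ [(row.length : Int)]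
    total + (((bounds.zip bounds.tail).filter (fun p => p.2 - p.1 - 1 == K)).length : Int)) 0

-- ===== PRECONDITION & SPEC =====
def Spec_cnt_K (matrix : List (List String)) (K : Int) (out : Int) : Prop := out = cnt_K_alt matrix K
instance (matrix : List (List String)) (K : Int) (out : Int) : Decidable (Spec_cnt_K matrix K out) := by unfold Spec_cnt_K; infer_instance

-- ===== CLAIM (what is proved, stated in full; the proofs are below) =====
def Claim_equal_cnt_K : Prop := ∀ (matrix : List (List String)) (K : Int), Dom_cnt_K matrix K → Spec_cnt_K matrix K (cnt_K matrix K)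

-- ===== LEMMAS AND PROOFS =====

/-- Common spec: number of maximal segments (split at `"0"` cells, including the trailing one)
whose length is `K`, given that the current open segment already has length `cnt`. -/
def countSegs (K : Int) (cnt : Int) : List String → Int
  | [] => if cnt == K then 1 else 0
  | b :: t => if b == "0" then (if cnt == K then 1 else 0) + countSegs K 0 t
              else countSegs K (cnt + 1) t

def zsFrom (i : Nat) (row : List String) : List Int :=
  (row.zipIdx i).filterMap (fun p => if p.1 == "0" then some (p.2 : Int) else none)

def countAdj (K : Int) (l : List Int) : Int :=
  (((l.zip l.tail).filter (fun p => p.2 - p.1 - 1 == K)).length : Int)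

theorem countAdj_cons (K x y : Int) (rest : List Int) :
    countAdj K (x :: y :: rest) = (if y - x - 1 == K then 1 else 0) + countAdj K (y :: rest) := by
  simp only [countAdj, List.zip_cons_cons, List.tail_cons, List.filter]
  split_ifs with h <;> simp [h] <;> push_cast <;> ring

theorem A_row (K : Int) (row : List String) : ∀ (acc cnt : Int),
    (let r := row.foldl (fun (st : Int × Int) block =>
        if block == "0" then ((if st.2 == K then st.1 + 1 else st.1), 0)
        else (st.1, st.2 + 1)) (acc, cnt)
     if r.2 == K then r.1 + 1 else r.1) = acc + countSegs K cnt row := by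
  induction row with
  | nil =>
      intro acc cnt
      simp only [List.foldl_nil, countSegs]
      split_ifs <;> ring
  | cons b t ih =>
      intro acc cnt
      simp only [List.foldl_cons, countSegs]
      by_cases hb : b = "0"
      · simp only [hb, beq_self_eq_true, if_true]
        rw [show ((if (cnt == K) then acc + 1 else acc), (0:Int)) =
              ((if (cnt == K) then acc + 1 else acc), (0:Int)) from rfl]
        rw [ih]
        split_ifs <;> ring
      · simp only [show (b == "0") = false from beq_eq_false_iff_ne.mpr hb, if_false]
        exact ih acc (cnt + 1)

theorem B_row (K : Int) (row : List String) : ∀ (prev : Int) (i : Nat),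
    countAdj K (prev :: zsFrom i row ++ [((i : Int) + row.length)]) =
      countSegs K ((i : Int) - prev - 1) row := by
  induction row with
  | nil =>
      intro prev i
      simp only [zsFrom, List.zipIdx_nil, List.filterMap_nil, List.length_nil, Nat.cast_zero,
        add_zero, List.nil_append]
      by_cases h : ((i : Int) - prev - 1 == K) = true
      · simp [countAdj, countSegs, List.filter, h]
      · simp only [countAdj, countSegs, List.zip_cons_cons, List.tail_cons, List.zip_nil_right,
          List.filter, h]
        simp [h]
  | cons b t ih =>
      intro prev i
      have hlen : ((i : Int) + ((b :: t).length : Int)) = (((i + 1 : Nat) : Int) + (t.length : Int)) := by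
        push_cast [List.length_cons]; ring
      by_cases hb : b = "0"
      · have hz : zsFrom i (b :: t) = (i : Int) :: zsFrom (i + 1) t := by
          simp [zsFrom, List.zipIdx_cons, hb]
        rw [hz, hlen]
        have h2 := ih (i : Int) (i + 1)
        have e : (((i + 1 : Nat) : Int) - (i : Int) - 1) = 0 := by push_cast; ring
        rw [e] at h2
        have hstep : countAdj K (prev :: (i : Int) ::
              (zsFrom (i + 1) t ++ [(((i + 1 : Nat)) : Int) + (t.length : Int)])) =
            (if ((i : Int) - prev - 1 == K) = true then 1 else 0) + countSegs K 0 t := by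
          rw [countAdj_cons]
          congr 1
        have hrhs : countSegs K ((i : Int) - prev - 1) (b :: t) =
            (if ((i : Int) - prev - 1 == K) = true then 1 else 0) + countSegs K 0 t := by
          simp [countSegs, hb]
        exact hstep.trans hrhs.symm
      · have hz : zsFrom i (b :: t) = zsFrom (i + 1) t := by
          simp [zsFrom, List.zipIdx_cons, hb]
        have h2 := ih prev (i + 1)
        have e : (((i + 1 : Nat) : Int) - prev - 1) = ((i : Int) - prev - 1) + 1 := by
          push_cast; ring
        rw [e] at h2
        rw [hz, hlen]
        rw [show countSegs K ((i : Int) - prev - 1) (b :: t) =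
              countSegs K (((i : Int) - prev - 1) + 1) t from by
            simp [countSegs, hb]]
        exact h2

theorem fold_eq (K : Int) (matrix : List (List String)) : ∀ (acc : Int),
    matrix.foldl (fun cntK row =>
      let r := row.foldl (fun (st : Int × Int) block =>
        if block == "0" then ((if st.2 == K then st.1 + 1 else st.1), 0)
        else (st.1, st.2 + 1)) (cntK, 0)
      if r.2 == K then r.1 + 1 else r.1) acc =
    matrix.foldl (fun total row =>
      let zs : List Int := row.zipIdx.filterMap (fun p => if p.1 == "0" then some (p.2 : Int) else none)
      let bounds : List Int := (-1 : Int) :: zs ++ [(row.length : Int)]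
      total + (((bounds.zip bounds.tail).filter (fun p => p.2 - p.1 - 1 == K)).length : Int)) acc := by
  induction matrix with
  | nil => intro acc; rfl
  | cons row t ih =>
      intro acc
      simp only [List.foldl_cons]
      rw [A_row K row acc 0, ih (acc + countSegs K 0 row)]
      congr 1
      have h := B_row K row (-1) 0
      norm_num at h
      exact congrArg (fun z => acc + z) h.symm

-- ===== VERDICT (by name: the statement is the Claim_ definition above) =====
theorem cnt_K_spec : Claim_equal_cnt_K := by
  intro matrix K _
  unfold Spec_cnt_K cnt_K cnt_K_alt
  exact fold_eq K matrix 0
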